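-- pv_equiv track=rewrite | github.com/ChroniumSync/ChroniumSync | backend/core_python/core_module_1.py | time_based_partition
-- ===== SOURCE A (Python) =====
-- def time_based_partition(data, interval=60):
--     partitions = {}
--     for entry in data:
--         bucket = entry["timestamp"] // interval
--         if bucket not in partitions:
--             partitions[bucket] = []
--         partitions[bucket].append(entry)
--     return partitions
-- ===== SOURCE B (Python) =====
-- def time_based_partition(data, interval=60):
--     def key(entry):
--         return entry["timestamp"] // interval
--     buckets = list(dict.fromkeys(key(e) for e in data))
--     return {b: [e for e in data if key(e) == b] for b in buckets}
-- ===== Notes on version B (the rewrite author's own statement) =====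
-- stated objective: alternative
-- what changed: A builds the bucket dict in a single pass, appending each entry as it goes; B instead computes the ordered-deduplicated list of bucket keys first and then builds each bucket with one filter pass over the data, via a dict comprehension.
import Mathlib
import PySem

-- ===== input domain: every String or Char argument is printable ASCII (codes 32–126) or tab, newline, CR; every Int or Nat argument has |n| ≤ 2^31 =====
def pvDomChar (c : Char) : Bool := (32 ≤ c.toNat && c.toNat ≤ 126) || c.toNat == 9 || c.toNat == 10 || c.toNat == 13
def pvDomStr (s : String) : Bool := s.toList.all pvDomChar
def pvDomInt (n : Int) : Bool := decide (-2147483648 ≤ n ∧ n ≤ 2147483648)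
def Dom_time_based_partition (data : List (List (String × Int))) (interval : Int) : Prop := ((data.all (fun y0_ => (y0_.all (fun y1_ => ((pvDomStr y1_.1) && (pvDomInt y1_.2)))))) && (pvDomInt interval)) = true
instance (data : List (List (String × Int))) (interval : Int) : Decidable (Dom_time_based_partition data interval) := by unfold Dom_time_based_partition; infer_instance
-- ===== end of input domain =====

-- B replaces A's single-pass dict-building with a two-pass scheme (ordered-dedup of bucket keys,
-- then one filter per bucket); objective: alternative decomposition, not faster.


-- ===== PORT A =====
-- entry["timestamp"]: first-match lookup; KeyError (lookup = none) and interval = 0 are excluded by Pre_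
def time_based_partition (data : List (List (String × Int))) (interval : Int) : List (Int × List (List (String × Int))) :=
  (data.foldl (fun partitions entry =>
      let bucket := PySem.Int.floordiv ((entry.lookup "timestamp").getD 0) interval
      let partitions := if partitions.contains bucket then partitions else partitions.insert bucket []
      partitions.insert bucket (partitions.getD bucket [] ++ [entry]))
    PySem.Dict.empty).items

-- ===== PORT B =====
def time_based_partition_alt (data : List (List (String × Int))) (interval : Int) : List (Int × List (List (String × Int))) :=
  let key := fun (e : List (String × Int)) => PySem.Int.floordiv ((e.lookup "timestamp").getD 0) interval
  (PySem.List.dedup (data.map key)).map (fun b => (b, data.filter (fun e => key e == b)))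

-- ===== PRECONDITION & SPEC =====
-- Pre_ excludes exactly the inputs on which the Python A raises: interval = 0 (ZeroDivisionError)
-- and an entry without a "timestamp" key (KeyError)
def Pre_time_based_partition (data : List (List (String × Int))) (interval : Int) : Prop :=
  ∀ e ∈ data, interval ≠ 0 ∧ (e.lookup "timestamp").isSome
instance (data : List (List (String × Int))) (interval : Int) : Decidable (Pre_time_based_partition data interval) := by unfold Pre_time_based_partition; infer_instance
def pvWitness_time_based_partition : (List (List (String × Int))) × Int :=
  ([[("timestamp", 5)], [("timestamp", 130)], [("timestamp", 7)]], 60)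
def Spec_time_based_partition (data : List (List (String × Int))) (interval : Int) (out : List (Int × List (List (String × Int)))) : Prop := out = time_based_partition_alt data interval
instance (data : List (List (String × Int))) (interval : Int) (out : List (Int × List (List (String × Int)))) : Decidable (Spec_time_based_partition data interval out) := by unfold Spec_time_based_partition; infer_instance

-- ===== CLAIM (what is proved, stated in full; the proofs are below) =====
def Claim_equal_time_based_partition : Prop := ∀ (data : List (List (String × Int))) (interval : Int), Dom_time_based_partition data interval → Pre_time_based_partition data interval → Spec_time_based_partition data interval (time_based_partition data interval)

-- ===== LEMMAS AND PROOFS =====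

-- A's loop body ('install [] if absent, then append') is exactly the modify-append step
theorem stepA_eq_modify (b : Int) (d : PySem.Dict Int (List (List (String × Int)))) (e : List (String × Int)) :
    (let d' := if d.contains b then d else d.insert b []
     d'.insert b (d'.getD b [] ++ [e]))
    = d.modify b [] (· ++ [e]) := by
  simp only []
  by_cases h : d.contains b = true
  · simp [h, PySem.Dict.modify]
  · have hf : d.contains b = false := by simpa using h
    simp only [hf, Bool.false_eq_true, if_false, PySem.Dict.modify, PySem.Dict.getD_insert_self,
      List.nil_append]
    rw [PySem.Dict.insert_insert_self, PySem.Dict.getD_of_not_contains]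
    · simp
    · exact hf

-- the modify-append loop over any key function, characterised bucket by bucket
theorem getD_groupFold (data : List (List (String × Int))) (key : List (String × Int) → Int) (b : Int) :
    (data.foldl (fun d e => d.modify (key e) [] (· ++ [e]))
       (PySem.Dict.empty : PySem.Dict Int (List (List (String × Int))))).getD b []
    = data.filter (fun e => key e == b) := by
  have hp : (data.map (fun e => (key e, e))).foldl (fun d p => d.modify p.1 [] (· ++ [p.2]))
      (PySem.Dict.empty : PySem.Dict Int (List (List (String × Int))))
      = data.foldl (fun d e => d.modify (key e) [] (· ++ [e])) PySem.Dict.empty := by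
    rw [List.foldl_map]
  rw [← hp, PySem.Dict.getD_foldl_modify_append]
  simp [List.filter_map, Function.comp_def]

theorem keys_groupFold (data : List (List (String × Int))) (key : List (String × Int) → Int) :
    (data.foldl (fun d e => d.modify (key e) [] (· ++ [e]))
       (PySem.Dict.empty : PySem.Dict Int (List (List (String × Int))))).keys
    = PySem.List.dedup (data.map key) := by
  rw [PySem.Dict.keys_foldl_modify_key]
  simp [PySem.Dict.keys_empty, PySem.Set.update, PySem.List.dedup_eq_ofList, PySem.Set.ofList]

theorem time_based_partition_spec' (data : List (List (String × Int))) (interval : Int) :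
    time_based_partition data interval = time_based_partition_alt data interval := by
  unfold time_based_partition time_based_partition_alt
  simp only [stepA_eq_modify]
  rw [PySem.Dict.items_eq_map_keys _
        (PySem.Dict.nodup_keys_foldl_modify_key data
          (fun e => PySem.Int.floordiv ((e.lookup "timestamp").getD 0) interval) [] _
          PySem.Dict.empty (by simp)) [],
      keys_groupFold data (fun e => PySem.Int.floordiv ((e.lookup "timestamp").getD 0) interval)]
  simp only [getD_groupFold data (fun e => PySem.Int.floordiv ((e.lookup "timestamp").getD 0) interval)]

-- ===== VERDICT (by name: the statement is the Claim_ definition above) =====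
theorem time_based_partition_spec : Claim_equal_time_based_partition := by
  intro data interval _ _
  exact time_based_partition_spec' data interval
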